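-- pv_equiv track=rewrite | github.com/abdalhamidgamer00-create/distribution_of_goods | src/app/gui/utils/gui_components.py | group_files_by_source_target
-- ===== SOURCE A (Python) =====
-- def group_files_by_source_target(files: list) -> dict:
--     """Group files by source and target branches.
--
--     Args:
--         files: List of file info dicts with 'source_branch' and 'target_branch' keys
--
--     Returns:
--         Dict mapping (source, target) tuples to lists of files
--     """
--     files_grouped = {}
--     for file_info in files:
--         source = file_info.get('source_branch', 'unknown')
--         target = file_info.get('target_branch', 'unknown')
--         key = (source, target)
--         if key not in files_grouped:
--             files_grouped[key] = []
--         files_grouped[key].append(file_info)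
--     return files_grouped
-- ===== SOURCE B (Python) =====
-- def group_files_by_source_target(files: list) -> dict:
--     """Group files by (source, target) branch pair.
--
--     Two-pass strategy: first collect the distinct keys in order of first
--     appearance, then build each group with one filter pass over the input.
--     """
--     def key(file_info):
--         return (file_info.get('source_branch', 'unknown'),
--                 file_info.get('target_branch', 'unknown'))
--     keys = dict.fromkeys(map(key, files))
--     return {k: [f for f in files if key(f) == k] for k in keys}
-- ===== Notes on version B (the rewrite author's own statement) =====
-- stated objective: alternative
-- what changed: Replaces the single-pass dict-accumulate-and-append loop by a two-pass strategy: an ordered dedup of the (source,target) keys followed by one filter comprehension per key.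
import Mathlib
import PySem

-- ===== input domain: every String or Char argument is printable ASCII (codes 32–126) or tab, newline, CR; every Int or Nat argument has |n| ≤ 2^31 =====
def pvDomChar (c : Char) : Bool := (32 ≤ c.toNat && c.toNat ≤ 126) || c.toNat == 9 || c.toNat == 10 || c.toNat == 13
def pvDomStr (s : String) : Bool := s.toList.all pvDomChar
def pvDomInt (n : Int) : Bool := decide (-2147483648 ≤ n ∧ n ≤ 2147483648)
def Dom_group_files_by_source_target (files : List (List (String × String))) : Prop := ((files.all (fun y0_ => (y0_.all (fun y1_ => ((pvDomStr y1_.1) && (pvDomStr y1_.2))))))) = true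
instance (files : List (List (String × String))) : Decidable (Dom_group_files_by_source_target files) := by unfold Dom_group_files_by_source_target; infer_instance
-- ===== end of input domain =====

-- B groups by a two-pass strategy (ordered dedup of keys, then one filter per key)
-- instead of A's single-pass dict accumulation; return values are identical.

-- ===== PORT A =====
def group_files_by_source_target (files : List (List (String × String))) : List (String × String × List (List (String × String))) :=
  let files_grouped : PySem.Dict (String × String) (List (List (String × String))) :=
    files.foldl (fun files_grouped file_info =>
      let source := (PySem.Dict.mk file_info).getD "source_branch" "unknown"
      let target := (PySem.Dict.mk file_info).getD "target_branch" "unknown"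
      let key := (source, target)
      let files_grouped := if files_grouped.contains key then files_grouped
                           else files_grouped.insert key []
      -- files_grouped[key].append(file_info)
      files_grouped.modify key [] (fun v => v ++ [file_info])) PySem.Dict.empty
  files_grouped.items.map (fun p => (p.1.1, p.1.2, p.2))

-- ===== PORT B =====
def pvKey (file_info : List (String × String)) : String × String :=
  ((PySem.Dict.mk file_info).getD "source_branch" "unknown",
   (PySem.Dict.mk file_info).getD "target_branch" "unknown")

def group_files_by_source_target_alt (files : List (List (String × String))) : List (String × String × List (List (String × String))) :=
  (PySem.List.dedup (files.map pvKey)).map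
    (fun k => (k.1, k.2, files.filter (fun f => pvKey f == k)))

-- ===== PRECONDITION & SPEC =====
def Spec_group_files_by_source_target (files : List (List (String × String))) (out : List (String × String × List (List (String × String)))) : Prop := out = group_files_by_source_target_alt files
instance (files : List (List (String × String))) (out : List (String × String × List (List (String × String)))) : Decidable (Spec_group_files_by_source_target files out) := by unfold Spec_group_files_by_source_target; infer_instance

-- ===== CLAIM (what is proved, stated in full; the proofs are below) =====
def Claim_equal_group_files_by_source_target : Prop := ∀ (files : List (List (String × String))), Dom_group_files_by_source_target files → Spec_group_files_by_source_target files (group_files_by_source_target files)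

-- ===== LEMMAS AND PROOFS =====

-- A's loop body (conditional [] insertion then append) is exactly Dict.modify with default [].
theorem pvStep_eq (g : PySem.Dict (String × String) (List (List (String × String))))
    (f : List (String × String)) :
    (let g' := if g.contains (pvKey f) then g else g.insert (pvKey f) [];
     g'.modify (pvKey f) [] (fun v => v ++ [f]))
    = g.modify (pvKey f) [] (fun v => v ++ [f]) := by
  by_cases h : g.contains (pvKey f)
  · simp [h]
  · simp only [Bool.not_eq_true] at h
    simp [h, PySem.Dict.modify, PySem.Dict.getD_insert_self,
      PySem.Dict.insert_insert_self, PySem.Dict.getD_of_not_contains]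

theorem pvGrouped_items (files : List (List (String × String))) :
    (files.foldl (fun g f => g.modify (pvKey f) [] (fun v => v ++ [f]))
        (PySem.Dict.empty : PySem.Dict (String × String) (List (List (String × String))))).items
    = (PySem.List.dedup (files.map pvKey)).map
        (fun k => (k, files.filter (fun f => pvKey f == k))) := by
  set G := files.foldl (fun g f => g.modify (pvKey f) [] (fun v => v ++ [f]))
      (PySem.Dict.empty : PySem.Dict (String × String) (List (List (String × String)))) with hG
  have hnodup : G.keys.Nodup := by
    exact PySem.Dict.nodup_keys_foldl_modify_key files pvKey []
      (fun _ f => fun v => v ++ [f]) _ (by simp)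
  have hkeys : G.keys = PySem.List.dedup (files.map pvKey) := by
    rw [hG, PySem.Dict.keys_foldl_modify_key files pvKey [] (fun _ f => fun v => v ++ [f])]
    simp [PySem.Dict.keys_empty, PySem.Set.update_nil_left, PySem.List.dedup_eq_ofList]
  have hval : ∀ k, G.getD k [] = files.filter (fun f => pvKey f == k) := by
    intro k
    have : G = (files.map (fun f => (pvKey f, f))).foldl
        (fun g p => g.modify p.1 [] (fun v => v ++ [p.2])) PySem.Dict.empty := by
      rw [hG, List.foldl_map]
    rw [this, PySem.Dict.getD_foldl_modify_append]
    simp [PySem.Dict.getD_empty, List.filter_map, Function.comp_def, List.map_map]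
  rw [PySem.Dict.items_eq_map_keys G hnodup [], hkeys]
  exact List.map_congr_left (fun k _ => by rw [hval k])

-- ===== VERDICT (by name: the statement is the Claim_ definition above) =====
theorem group_files_by_source_target_spec : Claim_equal_group_files_by_source_target := by
  intro files _
  show (files.foldl (fun g f =>
      let g' := if g.contains (pvKey f) then g else g.insert (pvKey f) [];
      g'.modify (pvKey f) [] (fun v => v ++ [f]))
      (PySem.Dict.empty : PySem.Dict (String × String) (List (List (String × String))))).items.map
      (fun p => (p.1.1, p.1.2, p.2)) = group_files_by_source_target_alt files
  rw [funext fun g => funext fun f => pvStep_eq g f]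
  rw [pvGrouped_items, List.map_map]
  rfl
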